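-- pv_equiv track=rewrite | github.com/anshikaCSE007/DSA | Arrays/SpecialSubsequenceAG/specialSubsequenceAG.py | solve
-- ===== SOURCE A (Python) =====
-- def solve(A):
--     n = len(A);
--     c = 0;
--     ans = 0;
--     for i in range(n-1, -1, -1):
--         if(A[i] == 'G'):
--             c+=1;
--         elif(A[i] == 'A'):
--             ans+=c;
--     return ans%(10**9 + 7);
-- ===== SOURCE B (Python) =====
-- def solve(A):
--     # Divide and conquer: rec(s) = (#'A' in s, #'G' in s, # of A..G pairs in s).
--     # Combining halves: cross pairs are (A's in left) * (G's in right).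
--     def rec(s):
--         if len(s) <= 1:
--             if s == 'A':
--                 return (1, 0, 0)
--             if s == 'G':
--                 return (0, 1, 0)
--             return (0, 0, 0)
--         m = len(s) // 2
--         a1, g1, p1 = rec(s[:m])
--         a2, g2, p2 = rec(s[m:])
--         return (a1 + a2, g1 + g2, p1 + p2 + a1 * g2)
--     return rec(A)[2] % (10**9 + 7)
-- ===== Notes on version B (the rewrite author's own statement) =====
-- stated objective: alternative
-- what changed: Replaces A's backward single-pass accumulator loop by a divide-and-conquer recursion that splits the string in half and combines (countA, countG, pairs) triples, counting cross pairs as countA(left)*countG(right).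
import Mathlib
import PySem

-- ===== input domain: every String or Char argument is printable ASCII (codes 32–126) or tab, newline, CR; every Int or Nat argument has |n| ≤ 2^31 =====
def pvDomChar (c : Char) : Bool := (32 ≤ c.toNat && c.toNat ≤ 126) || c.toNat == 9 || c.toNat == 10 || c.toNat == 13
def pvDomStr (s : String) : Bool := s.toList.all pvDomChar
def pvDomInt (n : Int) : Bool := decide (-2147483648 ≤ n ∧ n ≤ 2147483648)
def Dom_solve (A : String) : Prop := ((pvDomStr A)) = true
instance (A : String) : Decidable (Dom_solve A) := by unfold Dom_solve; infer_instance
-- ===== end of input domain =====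

-- B replaces A's backward accumulator loop by a divide-and-conquer recursion on string halves; alternative decomposition, not claimed faster.

-- ===== PORT A =====
-- backward loop over indices n-1 .. 0; state (c = #G seen, ans)
def solve (A : String) : Int :=
  let xs := A.toList
  let n : Int := PySem.Str.len A
  let res := (PySem.List.pyRange (n - 1) (-1) (-1)).foldl
    (fun (st : Int × Int) i =>
      if PySem.List.pyGetD xs i ' ' = 'G' then (st.1 + 1, st.2)
      else if PySem.List.pyGetD xs i ' ' = 'A' then (st.1, st.2 + st.1)
      else st) (0, 0)
  PySem.Int.mod res.2 (10 ^ 9 + 7)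

-- ===== PORT B =====
-- rec(s) of Source B on List Char: (#'A', #'G', #AG-pairs); s[:m] / s[m:] with m = len//2 ≥ 0
-- are exactly List.take m / List.drop m (PySem.List.slice_to_natCast / slice_from_natCast).
-- The Nat fuel is only a structural-recursion totality guard (recursion depth ≤ length);
-- with fuel = length + 1 the zero-fuel branch is never reached.
def dcRec : Nat → List Char → Int × Int × Int
  | 0, _ => (0, 0, 0)
  | fuel + 1, xs =>
    if xs.length ≤ 1 then
      if xs = ['A'] then (1, 0, 0)
      else if xs = ['G'] then (0, 1, 0)
      else (0, 0, 0)
    else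
      let m := xs.length / 2
      let l := dcRec fuel (xs.take m)
      let r := dcRec fuel (xs.drop m)
      (l.1 + r.1, l.2.1 + r.2.1, l.2.2 + r.2.2 + l.1 * r.2.1)

def solve_alt (A : String) : Int :=
  PySem.Int.mod (dcRec (A.toList.length + 1) A.toList).2.2 (10 ^ 9 + 7)

-- ===== PRECONDITION & SPEC =====
def Spec_solve (A : String) (out : Int) : Prop := out = solve_alt A
instance (A : String) (out : Int) : Decidable (Spec_solve A out) := by unfold Spec_solve; infer_instance

-- ===== CLAIM (what is proved, stated in full; the proofs are below) =====
def Claim_equal_solve : Prop := ∀ (A : String), Dom_solve A → Spec_solve A (solve A)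

-- ===== LEMMAS AND PROOFS =====

-- specification counts
def cA : List Char → Int
  | [] => 0
  | c :: t => (if c = 'A' then 1 else 0) + cA t

def cG : List Char → Int
  | [] => 0
  | c :: t => (if c = 'G' then 1 else 0) + cG t

def pr : List Char → Int
  | [] => 0
  | c :: t => (if c = 'A' then cG t else 0) + pr t

-- A's per-character step acting on the backward state (c, ans)
def bkStep (ch : Char) (st : Int × Int) : Int × Int :=
  if ch = 'G' then (st.1 + 1, st.2)
  else if ch = 'A' then (st.1, st.2 + st.1)
  else st

lemma bk_eq_spec (xs : List Char) : xs.foldr bkStep (0, 0) = (cG xs, pr xs) := by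
  induction xs with
  | nil => simp [cG, pr]
  | cons c t ih =>
      simp only [List.foldr_cons, ih, bkStep, cG, pr]
      by_cases hG : c = 'G'
      · have : ¬ c = 'A' := by simp [hG]
        simp [hG]; omega
      · by_cases hA : c = 'A'
        · simp only [if_neg hG, if_pos hA, Prod.mk.injEq]
          exact ⟨by ring, by ring⟩
        · simp [hG, hA]

lemma cA_append (xs ys : List Char) : cA (xs ++ ys) = cA xs + cA ys := by
  induction xs with
  | nil => simp [cA]
  | cons c t ih => simp only [List.cons_append, cA, ih]; ring

lemma cG_append (xs ys : List Char) : cG (xs ++ ys) = cG xs + cG ys := by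
  induction xs with
  | nil => simp [cG]
  | cons c t ih => simp only [List.cons_append, cG, ih]; ring

lemma pr_append (xs ys : List Char) :
    pr (xs ++ ys) = pr xs + pr ys + cA xs * cG ys := by
  induction xs with
  | nil => simp [pr, cA]
  | cons c t ih =>
      simp only [List.cons_append, pr, cA, ih, cG_append]
      by_cases hA : c = 'A' <;> simp [hA] <;> ring

lemma dcRec_spec_aux : ∀ fuel, ∀ xs : List Char, xs.length < fuel →
    dcRec fuel xs = (cA xs, cG xs, pr xs) := by
  intro fuel
  induction fuel with
  | zero => intro xs h; omega
  | succ n ih =>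
      intro xs h
      rw [dcRec]
      by_cases hle : xs.length ≤ 1
      · simp only [if_pos hle]
        rcases xs with _ | ⟨c, _ | ⟨d, t⟩⟩
        · simp [cA, cG, pr]
        · by_cases hA : c = 'A'
          · subst hA; simp [cA, cG, pr]
          · by_cases hG : c = 'G'
            · subst hG; simp [cA, cG, pr]
            · have h1 : ¬ ([c] = ['A']) := by simpa using hA
              have h2 : ¬ ([c] = ['G']) := by simpa using hG
              simp [h1, h2, cA, cG, pr, hA, hG]
        · simp at hle
      · simp only [if_neg hle]
        have ht := ih (xs.take (xs.length / 2)) (by simp only [List.length_take]; omega)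
        have hd := ih (xs.drop (xs.length / 2)) (by simp only [List.length_drop]; omega)
        rw [ht, hd]
        simp only [Prod.mk.injEq]
        refine ⟨?_, ?_, ?_⟩
        · rw [← cA_append, List.take_append_drop]
        · rw [← cG_append, List.take_append_drop]
        · have hp := pr_append (xs.take (xs.length / 2)) (xs.drop (xs.length / 2))
          rw [List.take_append_drop] at hp
          exact hp.symm

lemma dcRec_spec (xs : List Char) :
    dcRec (xs.length + 1) xs = (cA xs, cG xs, pr xs) :=
  dcRec_spec_aux (xs.length + 1) xs (Nat.lt_succ_self _)

-- ===== VERDICT (by name: the statement is the Claim_ definition above) =====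
theorem solve_spec : Claim_equal_solve := by
  intro A _
  show solve A = solve_alt A
  simp only [solve, solve_alt]
  have hrev : PySem.List.pyRange ((PySem.Str.len A) - 1) (-1) (-1)
      = (PySem.List.pyRange 0 (PySem.Str.len A) 1).reverse := by
    rw [PySem.List.pyRange_neg_one_eq_reverse]
    norm_num
  rw [hrev]
  have hmap : (PySem.List.pyRange 0 (PySem.Str.len A) 1).map
      (fun i => PySem.List.pyGetD A.toList i ' ') = A.toList := by
    have := PySem.List.map_pyGetD_pyRange_zero A.toList ' '
    simpa [PySem.Str.len] using this
  have hstep : ∀ (l : List Int),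
      l.foldr (fun i (st : Int × Int) =>
          if PySem.List.pyGetD A.toList i ' ' = 'G' then (st.1 + 1, st.2)
          else if PySem.List.pyGetD A.toList i ' ' = 'A' then (st.1, st.2 + st.1)
          else st) (0, 0)
        = (l.map (fun i => PySem.List.pyGetD A.toList i ' ')).foldr bkStep (0, 0) := by
    intro l
    rw [List.foldr_map]
    rfl
  have hfold :
      ((PySem.List.pyRange 0 (PySem.Str.len A) 1).reverse).foldl
        (fun (st : Int × Int) i =>
          if PySem.List.pyGetD A.toList i ' ' = 'G' then (st.1 + 1, st.2)
          else if PySem.List.pyGetD A.toList i ' ' = 'A' then (st.1, st.2 + st.1)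
          else st) (0, 0)
      = A.toList.foldr bkStep (0, 0) := by
    rw [List.foldl_reverse]
    rw [hstep, hmap]
  rw [hfold, bk_eq_spec, dcRec_spec]
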